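-- pv_equiv track=rewrite | github.com/Tosif145/DHIRA-assignment | VowelsCount/counter.py | count_and_convert_vowels
-- ===== SOURCE A (Python) =====
-- def count_and_convert_vowels(input_string):
--     vowels = 'aeiou'
--     vowel_count = 0
--     converted_string = ''
--
--     for char in input_string:
--         if char.lower() in vowels:
--             converted_string += char.upper()
--             vowel_count += 1
--         else:
--             converted_string += char
--
--     return vowel_count, converted_string
-- ===== SOURCE B (Python) =====
-- _VOWELS = 'aeiouAEIOU'
-- _UPPER_TABLE = str.maketrans(_VOWELS, _VOWELS.upper())
-- _DELETE_TABLE = str.maketrans('', '', _VOWELS)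
--
--
-- def count_and_convert_vowels(input_string):
--     vowel_count = len(input_string) - len(input_string.translate(_DELETE_TABLE))
--     return vowel_count, input_string.translate(_UPPER_TABLE)
-- ===== Notes on version B (the rewrite author's own statement) =====
-- stated objective: faster
-- what changed: Replaces the explicit per-character loop with string concatenation by two str.translate calls over precomputed tables: one uppercasing vowels, one deleting them so the count is a length difference.
import Mathlib
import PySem

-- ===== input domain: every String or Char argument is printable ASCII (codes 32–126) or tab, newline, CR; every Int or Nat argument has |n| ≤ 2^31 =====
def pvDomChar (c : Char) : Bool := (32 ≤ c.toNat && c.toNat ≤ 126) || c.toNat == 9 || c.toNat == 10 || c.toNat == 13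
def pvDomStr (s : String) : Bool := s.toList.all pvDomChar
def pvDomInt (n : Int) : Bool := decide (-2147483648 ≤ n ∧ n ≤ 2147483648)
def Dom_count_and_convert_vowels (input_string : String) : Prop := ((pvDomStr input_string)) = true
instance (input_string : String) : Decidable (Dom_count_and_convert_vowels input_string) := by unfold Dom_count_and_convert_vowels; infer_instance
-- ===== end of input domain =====

-- B replaces A's per-character accumulating loop by two translation-table passes
-- (uppercase the vowels; delete the vowels and take a length difference for the count).

-- ===== PORT A =====
def count_and_convert_vowels (input_string : String) : Int × String :=
  let vowels := "aeiou"
  let r := input_string.toList.foldl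
    (fun (st : Int × List Char) char =>
      if PySem.Chars.isIn [PySem.Chars.lowerChar char] vowels.toList then
        (st.1 + 1, st.2 ++ [PySem.Chars.upperChar char])
      else
        (st.1, st.2 ++ [char]))
    (0, [])
  (r.1, String.ofList r.2)

-- ===== PORT B =====
-- the vowel set of Source B's two translation tables, as the character map they denote (exact:
-- str.translate maps each character independently; _UPPER_TABLE uppercases vowels, _DELETE_TABLE drops them)
def pvVowelTable : List Char := ['a', 'e', 'i', 'o', 'u', 'A', 'E', 'I', 'O', 'U']

def count_and_convert_vowels_alt (input_string : String) : Int × String :=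
  let cs := input_string.toList
  let deleted := cs.filter (fun c => !pvVowelTable.contains c)   -- input_string.translate(_DELETE_TABLE)
  let converted := cs.map (fun c => if pvVowelTable.contains c then PySem.Chars.upperChar c else c)  -- input_string.translate(_UPPER_TABLE)
  ((cs.length : Int) - (deleted.length : Int), String.ofList converted)

-- ===== PRECONDITION & SPEC =====
def Spec_count_and_convert_vowels (input_string : String) (out : Int × String) : Prop := out = count_and_convert_vowels_alt input_string
instance (input_string : String) (out : Int × String) : Decidable (Spec_count_and_convert_vowels input_string out) := by unfold Spec_count_and_convert_vowels; infer_instance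

-- ===== CLAIM (what is proved, stated in full; the proofs are below) =====
def Claim_equal_count_and_convert_vowels : Prop := ∀ (input_string : String), Dom_count_and_convert_vowels input_string → Spec_count_and_convert_vowels input_string (count_and_convert_vowels input_string)

-- ===== LEMMAS AND PROOFS =====

lemma singleton_infix_iff {α : Type} (a : α) (l : List α) : [a] <:+: l ↔ a ∈ l := by
  constructor
  · intro h
    exact h.mem (List.mem_singleton_self a)
  · intro h
    obtain ⟨s, t, rfl⟩ := List.append_of_mem h
    exact ⟨s, t, by simp⟩

lemma char_toNat_inj (a b : Char) : a = b ↔ a.toNat = b.toNat := by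
  constructor
  · intro h; rw [h]
  · intro h; exact Char.ext (UInt32.toNat_inj.mp h)

lemma lowerChar_toNat (c : Char) :
    (PySem.Chars.lowerChar c).toNat =
      if 65 ≤ c.toNat ∧ c.toNat ≤ 90 then c.toNat + 32 else c.toNat := by
  have hA : ('A' ≤ c) ↔ 65 ≤ c.toNat := by simp [Char.le_def, UInt32.le_iff_toNat_le]
  have hZ : (c ≤ 'Z') ↔ c.toNat ≤ 90 := by simp [Char.le_def, UInt32.le_iff_toNat_le]
  simp only [PySem.Chars.lowerChar, PySem.Chars.isupper, Bool.and_eq_true, decide_eq_true_eq]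
  split_ifs with h1 h2 h2
  · have hv : c.toNat + 32 < 55296 := by omega
    generalize hn : c.toNat + 32 = n at hv ⊢
    simp [Char.ofNat, Char.toNat, Nat.isValidChar, hv, Char.ofNatAux]
  · exact absurd ⟨hA.mp h1.1, hZ.mp h1.2⟩ h2
  · exact absurd ⟨hA.mpr h2.1, hZ.mpr h2.2⟩ h1
  · rfl

-- the per-character fact linking A's case-insensitive test to B's ten-vowel table
lemma test_eq_table (c : Char) :
    PySem.Chars.isIn [PySem.Chars.lowerChar c] "aeiou".toList = pvVowelTable.contains c := by
  have hl := lowerChar_toNat c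
  rw [Bool.eq_iff_iff, PySem.Chars.isIn_iff_infix, singleton_infix_iff]
  have hv : "aeiou".toList = ['a', 'e', 'i', 'o', 'u'] := rfl
  rw [hv]
  simp only [pvVowelTable, List.contains_eq_mem, decide_eq_true_eq, List.mem_cons,
    List.not_mem_nil, or_false, char_toNat_inj, hl]
  have e1 : ('a').toNat = 97 := rfl
  have e2 : ('e').toNat = 101 := rfl
  have e3 : ('i').toNat = 105 := rfl
  have e4 : ('o').toNat = 111 := rfl
  have e5 : ('u').toNat = 117 := rfl
  have e6 : ('A').toNat = 65 := rfl
  have e7 : ('E').toNat = 69 := rfl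
  have e8 : ('I').toNat = 73 := rfl
  have e9 : ('O').toNat = 79 := rfl
  have e10 : ('U').toNat = 85 := rfl
  rw [e1, e2, e3, e4, e5, e6, e7, e8, e9, e10]
  split_ifs with h <;> omega

lemma foldA (cs : List Char) (n : Int) (acc : List Char) :
    cs.foldl
      (fun (st : Int × List Char) char =>
        if PySem.Chars.isIn [PySem.Chars.lowerChar char] "aeiou".toList then
          (st.1 + 1, st.2 ++ [PySem.Chars.upperChar char])
        else
          (st.1, st.2 ++ [char]))
      (n, acc)
    = (n + ((cs.filter (fun c => pvVowelTable.contains c)).length : Int),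
       acc ++ cs.map (fun c => if pvVowelTable.contains c then PySem.Chars.upperChar c else c)) := by
  induction cs generalizing n acc with
  | nil => simp
  | cons c cs ih =>
    simp only [List.foldl_cons]
    by_cases h : pvVowelTable.contains c = true
    · rw [if_pos (by rw [test_eq_table]; exact h), ih]
      simp only [List.filter_cons, List.map_cons, h, if_pos]
      refine Prod.ext ?_ ?_
      · simp only [List.length_cons]; push_cast; omega
      · simp
    · rw [if_neg (by rw [test_eq_table]; simpa using h), ih]
      simp only [List.filter_cons, List.map_cons, h, if_neg]
      refine Prod.ext ?_ ?_
      · simp [h]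
      · simp [h]

lemma filter_length_split (cs : List Char) :
    (cs.filter (fun c => pvVowelTable.contains c)).length
      + (cs.filter (fun c => !pvVowelTable.contains c)).length = cs.length := by
  exact (List.length_eq_length_filter_add (fun c => pvVowelTable.contains c)).symm

-- ===== VERDICT (by name: the statement is the Claim_ definition above) =====
theorem count_and_convert_vowels_spec : Claim_equal_count_and_convert_vowels := by
  intro s _
  unfold Spec_count_and_convert_vowels count_and_convert_vowels count_and_convert_vowels_alt
  simp only [foldA]
  have h := filter_length_split s.toList
  refine Prod.ext ?_ ?_
  · show (0 : Int) + _ = _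
    push_cast
    omega
  · simp
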